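-- pv_equiv track=rewrite | github.com/zodyking/Home-Climate | custom_components/home_climate/websocket.py | _device_name_to_notify_slug
-- ===== SOURCE A (Python) =====
-- def _device_name_to_notify_slug(name: str) -> str:
--     """Convert device name to notify.mobile_app_ slug: lowercase, spaces to underscore, remove apostrophes."""
--     if not name:
--         return ""
--     s = str(name).lower().strip()
--     for c in "'\"`":
--         s = s.replace(c, "")
--     s = "_".join(s.split())
--     return s
-- ===== SOURCE B (Python) =====
-- def _device_name_to_notify_slug(name: str) -> str:
--     if not name:
--         return ""
--     out = []
--     pending = False
--     for c in name.lower():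
--         if c in "'\"`":
--             continue
--         if c.isspace():
--             pending = True
--         else:
--             if pending and out:
--                 out.append("_")
--             pending = False
--             out.append(c)
--     return "".join(out)
-- ===== Notes on version B (the rewrite author's own statement) =====
-- stated objective: simpler
-- what changed: A's five passes over the string (lowercase+strip, three replace() calls to drop quote characters, then split and join on underscore) are fused into one left-to-right pass that skips quote characters and uses a pending-whitespace flag to emit collapsed underscore separators.
import Mathlib
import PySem

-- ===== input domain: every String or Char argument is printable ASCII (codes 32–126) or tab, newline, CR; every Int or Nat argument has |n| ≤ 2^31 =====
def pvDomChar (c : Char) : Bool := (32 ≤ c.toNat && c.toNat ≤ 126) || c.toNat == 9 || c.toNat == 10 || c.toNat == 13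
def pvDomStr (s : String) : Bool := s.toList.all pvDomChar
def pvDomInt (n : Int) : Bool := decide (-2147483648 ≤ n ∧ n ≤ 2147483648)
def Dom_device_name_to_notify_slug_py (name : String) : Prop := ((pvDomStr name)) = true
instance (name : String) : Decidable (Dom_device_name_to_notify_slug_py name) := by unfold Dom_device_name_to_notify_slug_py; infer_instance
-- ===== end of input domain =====

-- B replaces A's multi-pass pipeline (lower/strip, three replace() passes, split + join)
-- by a single character-by-character pass with a pending-separator flag; same return value.

-- ===== PORT A =====
-- A: if not name: return ""; s = name.lower().strip(); s.replace(c, "") for c in "'`\"; "_".join(s.split())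
def device_name_to_notify_slug_py (name : String) : String :=
  if name.toList = [] then "" else
    let s := PySem.Chars.strip (PySem.Chars.lower name.toList)
    let s := "'\"`".toList.foldl (fun t c => PySem.Chars.replace t [c] []) s
    String.ofList (PySem.Chars.join ['_'] (PySem.Chars.split₀ s))

-- ===== PORT B =====
-- the loop body of Source B: skip quote characters, whitespace only sets the pending flag, a
-- normal character first flushes one '_' (if pending and output non-empty), then is appended
def pvAltStep (st : List Char × Bool) (c : Char) : List Char × Bool :=
  if c ∈ "'\"`".toList then st
  else if PySem.Chars.isspace c then (st.1, true)
  else (st.1 ++ (if st.2 && !st.1.isEmpty then ['_'] else []) ++ [c], false)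

def device_name_to_notify_slug_py_alt (name : String) : String :=
  if name.toList = [] then "" else
    String.ofList (((PySem.Chars.lower name.toList).foldl pvAltStep ([], false)).1)

-- ===== PRECONDITION & SPEC =====
def Spec_device_name_to_notify_slug_py (name : String) (out : String) : Prop := out = device_name_to_notify_slug_py_alt name
instance (name : String) (out : String) : Decidable (Spec_device_name_to_notify_slug_py name out) := by unfold Spec_device_name_to_notify_slug_py; infer_instance

-- ===== CLAIM (what is proved, stated in full; the proofs are below) =====
def Claim_equal_device_name_to_notify_slug_py : Prop := ∀ (name : String), Dom_device_name_to_notify_slug_py name → Spec_device_name_to_notify_slug_py name (device_name_to_notify_slug_py name)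

-- ===== LEMMAS AND PROOFS =====

-- the non-quote characters (the ones both programs keep)
def pvKeep (c : Char) : Bool := !(c ∈ "'\"`".toList)

-- the whitespace-separated words of a string, left to right; `cur` is the (reversed) word in progress
def pvWords (cur : List Char) : List Char → List (List Char)
  | [] => if cur = [] then [] else [cur.reverse]
  | c :: rest =>
    if PySem.Chars.isspace c then
      (if cur = [] then [] else [cur.reverse]) ++ pvWords [] rest
    else pvWords (c :: cur) rest

-- how strings start, to describe B's pending flag
def pvStartsSpace : List Char → Bool
  | [] => false
  | c :: _ => PySem.Chars.isspace c

-- s.replace("<q>", "") is a filter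
theorem pv_replace_go_filter (q : Char) : ∀ (l : List Char) (acc : List Char) (fuel : Nat),
    l.length ≤ fuel →
    PySem.Chars.replace.go [q] [] fuel l acc = acc.reverse ++ l.filter (fun c => c != q) := by
  intro l
  induction l with
  | nil => intro acc fuel _; cases fuel <;> simp [PySem.Chars.replace.go]
  | cons c t ih =>
    intro acc fuel hf
    cases fuel with
    | zero => simp at hf
    | succ fuel =>
      simp only [List.length_cons, Nat.succ_le_succ_iff] at hf
      rw [PySem.Chars.replace.go]
      by_cases h : q = c
      · subst h
        simp [List.isPrefixOf, ih _ _ hf]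
      · simp [List.isPrefixOf, h, ih _ _ hf, Ne.symm h]

theorem pv_replace_filter (s : List Char) (q : Char) :
    PySem.Chars.replace s [q] [] = s.filter (fun c => c != q) := by
  rw [PySem.Chars.replace]
  simp [pv_replace_go_filter q s [] s.length le_rfl]

-- A's three replace passes together keep exactly the non-quote characters
theorem pv_three_replaces (s : List Char) :
    "'\"`".toList.foldl (fun t c => PySem.Chars.replace t [c] []) s = s.filter pvKeep := by
  show PySem.Chars.replace (PySem.Chars.replace (PySem.Chars.replace s ['\''] []) ['"'] []) ['`'] [] = _
  simp only [pv_replace_filter, List.filter_filter]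
  apply List.filter_congr
  intro c _
  simp [pvKeep, bne]
  ac_rfl

-- s.split() computes pvWords
theorem pv_split₀_go : ∀ (s cur acc : _),
    PySem.Chars.split₀.go s cur acc = acc.reverse ++ pvWords cur s := by
  intro s
  induction s with
  | nil => intro cur acc; by_cases h : cur = [] <;> simp [PySem.Chars.split₀.go, pvWords, h, List.isEmpty_iff]
  | cons c t ih =>
    intro cur acc
    rw [PySem.Chars.split₀.go, pvWords]
    by_cases hs : PySem.Chars.isspace c
    · by_cases h : cur = [] <;> simp [hs, h, ih, List.isEmpty_iff]
    · simp [hs, ih]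

theorem pv_split₀ (s : List Char) : PySem.Chars.split₀ s = pvWords [] s := by
  simp [PySem.Chars.split₀, pv_split₀_go]

-- whitespace characters are kept by the quote filter
theorem pv_space_keep (c : Char) (h : PySem.Chars.isspace c = true) : pvKeep c = true := by
  simp only [pvKeep, Bool.not_eq_true']
  by_contra hc
  simp only [Bool.not_eq_false, decide_eq_true_eq] at hc
  have : c = '\'' ∨ c = '"' ∨ c = '`' := by simpa using hc
  rcases this with rfl | rfl | rfl <;> simp [PySem.Chars.isspace] at h

theorem pv_words_append_space (w : Char) (hw : PySem.Chars.isspace w = true) :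
    ∀ (t : List Char) (cur : List Char), pvWords cur (t ++ [w]) = pvWords cur t := by
  intro t
  induction t with
  | nil => intro cur; by_cases h : cur = [] <;> simp [pvWords, hw, h]
  | cons c t ih =>
    intro cur
    by_cases hs : PySem.Chars.isspace c <;> simp [pvWords, hs, ih]

theorem pv_words_append_allspace (tail : List Char) (h : ∀ c ∈ tail, PySem.Chars.isspace c = true) :
    ∀ x : List Char, pvWords [] (x ++ tail) = pvWords [] x := by
  induction tail with
  | nil => simp
  | cons w tl ih =>
    intro x
    have hx : x ++ w :: tl = (x ++ [w]) ++ tl := by simp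
    rw [hx, ih (fun c hc => h c (List.mem_cons_of_mem _ hc)),
        pv_words_append_space w (h w (List.mem_cons_self ..))]

-- A's strip() does not change the words of the quote-filtered string
theorem pv_strip_words (u : List Char) :
    pvWords [] ((PySem.Chars.strip u).filter pvKeep) = pvWords [] (u.filter pvKeep) := by
  have lstrip : ∀ v : List Char, pvWords [] ((PySem.Chars.lstrip v).filter pvKeep)
      = pvWords [] (v.filter pvKeep) := by
    intro v
    induction v with
    | nil => rfl
    | cons c t ih =>
      by_cases hs : PySem.Chars.isspace c
      · rw [show PySem.Chars.lstrip (c :: t) = PySem.Chars.lstrip t by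
          simp [PySem.Chars.lstrip, hs], ih]
        simp [pv_space_keep c hs, pvWords, hs]
      · simp [PySem.Chars.lstrip, hs]
  have rstrip : ∀ v : List Char, pvWords [] ((PySem.Chars.rstrip v).filter pvKeep)
      = pvWords [] (v.filter pvKeep) := by
    intro v
    have hsplit : v = PySem.Chars.rstrip v ++ (v.reverse.takeWhile PySem.Chars.isspace).reverse := by
      have h1 : v.reverse = v.reverse.takeWhile PySem.Chars.isspace
          ++ v.reverse.dropWhile PySem.Chars.isspace := (List.takeWhile_append_dropWhile ..).symm
      have h2 := congrArg List.reverse h1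
      simp only [List.reverse_reverse, List.reverse_append] at h2
      simpa [PySem.Chars.rstrip] using h2
    have htail : ∀ c ∈ (v.reverse.takeWhile PySem.Chars.isspace).reverse, PySem.Chars.isspace c = true := by
      intro c hc
      exact List.mem_takeWhile_imp (List.mem_reverse.mp hc)
    conv_rhs => rw [hsplit]
    rw [List.filter_append, List.filter_eq_self.mpr (fun c hc => pv_space_keep c (htail c hc)),
        pv_words_append_allspace _ htail]
  rw [PySem.Chars.strip, rstrip, lstrip]

-- B's fold skips quote characters, so it only sees the filtered string
theorem pv_fold_filter (ds : List Char) : ∀ st,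
    ds.foldl pvAltStep st = (ds.filter pvKeep).foldl pvAltStep st := by
  induction ds with
  | nil => intro st; rfl
  | cons c t ih =>
    intro st
    by_cases h : c ∈ "'\"`".toList
    · have hst : pvAltStep st c = st := by unfold pvAltStep; rw [if_pos h]
      have hk : pvKeep c = false := by simp only [pvKeep, Bool.not_eq_false']; exact decide_eq_true h
      simp [hk, hst, ih]
    · have hk : pvKeep c = true := by simp only [pvKeep, Bool.not_eq_true']; exact decide_eq_false h
      simp [hk, List.foldl_cons, ih]

theorem pv_words_ne_nil : ∀ (t : List Char) (cur : List Char), cur ≠ [] →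
    pvWords cur t ≠ [] := by
  intro t
  induction t with
  | nil => intro cur hc; simp [pvWords, hc]
  | cons c t ih =>
    intro cur hc
    by_cases hs : PySem.Chars.isspace c
    · simp [pvWords, hs, hc]
    · simpa [pvWords, hs] using ih (c :: cur) (List.cons_ne_nil _ _)

-- gluing a word in progress onto the rendered remainder
theorem pv_join_glue : ∀ (t : List Char) (cur : List Char), cur ≠ [] →
    cur.reverse ++ (if pvStartsSpace t && !(pvWords [] t).isEmpty then ['_'] else [])
      ++ PySem.Chars.join ['_'] (pvWords [] t) = PySem.Chars.join ['_'] (pvWords cur t) := by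
  intro t
  induction t with
  | nil => intro cur hc; simp [pvWords, pvStartsSpace, hc, PySem.Chars.join_nil, PySem.Chars.join_singleton]
  | cons c t ih =>
    intro cur hc
    by_cases hs : PySem.Chars.isspace c
    · simp only [pvWords, hs, if_true, pvStartsSpace, Bool.true_and]
      rw [if_neg hc]
      rcases hw : pvWords [] t with _ | ⟨w, ws⟩
      · simp [PySem.Chars.join_nil, PySem.Chars.join_singleton]
      · simp [PySem.Chars.join_cons_cons]
    · have h1 := ih [c] (List.cons_ne_nil _ _)
      have h2 := ih (c :: cur) (List.cons_ne_nil _ _)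
      simp only [pvWords, hs, if_false, Bool.false_eq_true, pvStartsSpace, Bool.false_and,
        List.reverse_cons] at h2 ⊢
      rw [← h2, ← h1]
      simp [pvStartsSpace]

-- the invariant of B's fold: the output so far, the pending flag, and the words still to come
theorem pv_fold_render : ∀ (ds : List Char), (∀ c ∈ ds, pvKeep c = true) →
    ∀ (out : List Char) (p : Bool),
    (ds.foldl pvAltStep (out, p)).1 =
      if out = [] then PySem.Chars.join ['_'] (pvWords [] ds)
      else out ++ (if (p || pvStartsSpace ds) && !(pvWords [] ds).isEmpty then ['_'] else [])
             ++ PySem.Chars.join ['_'] (pvWords [] ds) := by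
  intro ds
  induction ds with
  | nil =>
    intro _ out p
    by_cases h : out = [] <;> simp [pvWords, pvStartsSpace, h, PySem.Chars.join_nil]
  | cons c t ih =>
    intro hall out p
    have hkc : pvKeep c = true := hall c (List.mem_cons_self ..)
    have hnq : c ∉ "'\"`".toList := by simpa [pvKeep] using hkc
    have ht := ih (fun d hd => hall d (List.mem_cons_of_mem _ hd))
    by_cases hs : PySem.Chars.isspace c
    · have hstep : pvAltStep (out, p) c = (out, true) := by
        unfold pvAltStep; rw [if_neg hnq, if_pos hs]
      rw [List.foldl_cons, hstep, ht]
      by_cases h : out = []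
      · simp [h, pvWords, hs]
      · simp [h, pvWords, hs, pvStartsSpace]
    · have hstep : pvAltStep (out, p) c
          = (out ++ (if p && !out.isEmpty then ['_'] else []) ++ [c], false) := by
        unfold pvAltStep; rw [if_neg hnq, if_neg hs]
      rw [List.foldl_cons, hstep, ht]
      have hout' : out ++ (if p && !out.isEmpty then ['_'] else []) ++ [c] ≠ [] := by simp
      rw [if_neg hout']
      have hglue := pv_join_glue t [c] (List.cons_ne_nil _ _)
      by_cases h : out = []
      · subst h
        have hw : pvWords [] (c :: t) = pvWords [c] t := by simp [pvWords, hs]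
        simp only [List.reverse_cons, List.reverse_nil, List.nil_append] at hglue
        simp only [hw, ← hglue]
        simp
      · have hw : pvWords [] (c :: t) = pvWords [c] t := by simp [pvWords, hs]
        have hne : pvWords [c] t ≠ [] := pv_words_ne_nil t [c] (List.cons_ne_nil _ _)
        have houtE : out.isEmpty = false := by simp [h]
        rw [if_neg h]
        simp only [hw, pvStartsSpace, hs, Bool.or_false, houtE, Bool.not_false, Bool.and_true, ← hglue]
        by_cases hp : p <;> simp [hp, hne]

-- ===== VERDICT (by name: the statement is the Claim_ definition above) =====
theorem device_name_to_notify_slug_py_spec : Claim_equal_device_name_to_notify_slug_py := by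
  intro name _
  unfold Spec_device_name_to_notify_slug_py
  unfold device_name_to_notify_slug_py device_name_to_notify_slug_py_alt
  by_cases h : name.toList = []
  · rw [if_pos h, if_pos h]
  · rw [if_neg h, if_neg h]
    refine congrArg String.ofList ?_
    rw [pv_three_replaces, pv_split₀, pv_strip_words,
        pv_fold_filter, pv_fold_render _ (fun c hc => List.of_mem_filter hc)]
    simp
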